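-- pv_equiv track=rewrite | github.com/timfengzi/PaddleOCR | paddleocr/_doc2md/converters/docx.py | _runs_to_html
-- ===== SOURCE A (Python) =====
-- def _merge_runs(items) -> list:
--     """Merge adjacent items with identical (bold, italic, underline, strikethrough, superscript, subscript, url).
--
--     Returns [(bold, italic, underline, strikethrough, superscript, subscript, text, url)].
--     """
--     merged: list[tuple[bool, bool, bool, bool, bool, bool, str, str]] = []
--     for (
--         bold,
--         italic,
--         underline,
--         strikethrough,
--         superscript,
--         subscript,
--         text,
--         url,
--     ) in items:
--         if not text:
--             continue
--         if (
--             merged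
--             and merged[-1][0] == bold
--             and merged[-1][1] == italic
--             and merged[-1][2] == underline
--             and merged[-1][3] == strikethrough
--             and merged[-1][4] == superscript
--             and merged[-1][5] == subscript
--             and merged[-1][7] == url
--         ):
--             merged[-1] = (
--                 bold,
--                 italic,
--                 underline,
--                 strikethrough,
--                 superscript,
--                 subscript,
--                 merged[-1][6] + text,
--                 url,
--             )
--         else:
--             merged.append(
--                 (
--                     bold,
--                     italic,
--                     underline,
--                     strikethrough,
--                     superscript,
--                     subscript,
--                     text,
--                     url,
--                 )
--             )
--     return merged
--
-- def _runs_to_html(items) -> str: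
--     """Convert paragraph items to HTML inline text."""
--     parts = []
--     for (
--         bold,
--         italic,
--         underline,
--         strikethrough,
--         superscript,
--         subscript,
--         text,
--         url,
--     ) in _merge_runs(items):
--         if bold:
--             text = f"<b>{text}</b>"
--         if italic:
--             text = f"<i>{text}</i>"
--         if underline:
--             text = f"<u>{text}</u>"
--         if strikethrough:
--             text = f"<del>{text}</del>"
--         if superscript:
--             text = f"<sup>{text}</sup>"
--         if subscript:
--             text = f"<sub>{text}</sub>"
--         if url:
--             text = f'<a href="{url}">{text}</a>'
--         parts.append(text)
--     return "".join(parts)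
-- ===== SOURCE B (Python) =====
-- def _style_key(run):
--     bold, italic, underline, strikethrough, superscript, subscript, _text, url = run
--     return (bold, italic, underline, strikethrough, superscript, subscript, url)
--
--
-- def _wrap(key, text):
--     bold, italic, underline, strikethrough, superscript, subscript, url = key
--     if bold:
--         text = f"<b>{text}</b>"
--     if italic:
--         text = f"<i>{text}</i>"
--     if underline:
--         text = f"<u>{text}</u>"
--     if strikethrough:
--         text = f"<del>{text}</del>"
--     if superscript:
--         text = f"<sup>{text}</sup>"
--     if subscript:
--         text = f"<sub>{text}</sub>"
--     if url:
--         text = f'<a href="{url}">{text}</a>'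
--     return text
--
--
-- def _runs_to_html(items) -> str:
--     """Convert paragraph items to HTML inline text."""
--     runs = [r for r in items if r[6]]
--     parts = []
--     i, n = 0, len(runs)
--     while i < n:
--         key = _style_key(runs[i])
--         j = i + 1
--         while j < n and _style_key(runs[j]) == key:
--             j += 1
--         parts.append(_wrap(key, "".join(r[6] for r in runs[i:j])))
--         i = j
--     return "".join(parts)
-- ===== Notes on version B (the rewrite author's own statement) =====
-- stated objective: idiomatic
-- what changed: Replaces A's single loop that mutates merged[-1] in a growing accumulator list with two shaped passes: filter out empty-text runs, then cut the run list into maximal adjacent same-style-key groups, join each group's texts once, and wrap each joined group.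
import Mathlib
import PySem

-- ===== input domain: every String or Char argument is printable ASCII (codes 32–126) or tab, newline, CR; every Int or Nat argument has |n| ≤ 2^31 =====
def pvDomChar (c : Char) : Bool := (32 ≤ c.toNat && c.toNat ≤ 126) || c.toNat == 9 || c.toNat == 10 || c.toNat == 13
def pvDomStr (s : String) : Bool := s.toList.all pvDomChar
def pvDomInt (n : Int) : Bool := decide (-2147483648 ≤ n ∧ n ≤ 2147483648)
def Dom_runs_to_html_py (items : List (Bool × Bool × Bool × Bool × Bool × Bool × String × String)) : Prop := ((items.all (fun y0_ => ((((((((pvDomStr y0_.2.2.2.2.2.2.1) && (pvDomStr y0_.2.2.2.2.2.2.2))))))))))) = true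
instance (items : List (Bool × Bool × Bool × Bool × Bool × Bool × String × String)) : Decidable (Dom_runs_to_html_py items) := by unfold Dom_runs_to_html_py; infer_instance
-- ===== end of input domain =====

-- B replaces A's running merged[-1] accumulator with two shaped passes (filter the
-- empty-text runs out, then cut the list into maximal same-style groups and join each
-- group's texts before wrapping) — objective: idiomatic grouping decomposition.

-- ===== PORT A =====
-- one step of _merge_runs' loop: skip empty text, extend merged[-1] on matching style, else append
def pvMergeStep (merged : List (Bool × Bool × Bool × Bool × Bool × Bool × String × String))
    (it : Bool × Bool × Bool × Bool × Bool × Bool × String × String) :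
    List (Bool × Bool × Bool × Bool × Bool × Bool × String × String) :=
  match it with
  | (bold, italic, underline, strikethrough, superscript, subscript, text, url) =>
    if text = "" then merged
    else
      match merged.getLast? with
      | some m =>
        if m.1 = bold ∧ m.2.1 = italic ∧ m.2.2.1 = underline ∧ m.2.2.2.1 = strikethrough ∧
            m.2.2.2.2.1 = superscript ∧ m.2.2.2.2.2.1 = subscript ∧ m.2.2.2.2.2.2.2 = url then
          merged.dropLast ++
            [(bold, italic, underline, strikethrough, superscript, subscript,
              m.2.2.2.2.2.2.1 ++ text, url)]
        else merged ++ [(bold, italic, underline, strikethrough, superscript, subscript, text, url)]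
      | none => merged ++ [(bold, italic, underline, strikethrough, superscript, subscript, text, url)]

def pvMergeRuns (items : List (Bool × Bool × Bool × Bool × Bool × Bool × String × String)) :
    List (Bool × Bool × Bool × Bool × Bool × Bool × String × String) :=
  items.foldl pvMergeStep []

-- the body of _runs_to_html's loop: wrap one merged run's text in its tags
def pvRenderA (r : Bool × Bool × Bool × Bool × Bool × Bool × String × String) : String :=
  match r with
  | (bold, italic, underline, strikethrough, superscript, subscript, text, url) =>
    let text := if bold then "<b>" ++ text ++ "</b>" else text
    let text := if italic then "<i>" ++ text ++ "</i>" else text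
    let text := if underline then "<u>" ++ text ++ "</u>" else text
    let text := if strikethrough then "<del>" ++ text ++ "</del>" else text
    let text := if superscript then "<sup>" ++ text ++ "</sup>" else text
    let text := if subscript then "<sub>" ++ text ++ "</sub>" else text
    if url ≠ "" then "<a href=\"" ++ url ++ "\">" ++ text ++ "</a>" else text

def runs_to_html_py (items : List (Bool × Bool × Bool × Bool × Bool × Bool × String × String)) : String :=
  PySem.Str.join "" ((pvMergeRuns items).map pvRenderA)

-- ===== PORT B =====
-- _style_key: the 7-tuple of all fields except the text
def pvStyleKey (r : Bool × Bool × Bool × Bool × Bool × Bool × String × String) :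
    Bool × Bool × Bool × Bool × Bool × Bool × String :=
  (r.1, r.2.1, r.2.2.1, r.2.2.2.1, r.2.2.2.2.1, r.2.2.2.2.2.1, r.2.2.2.2.2.2.2)

-- _wrap: wrap a group's joined text in the tags its style key demands
def pvWrapB (key : Bool × Bool × Bool × Bool × Bool × Bool × String) (text : String) : String :=
  match key with
  | (bold, italic, underline, strikethrough, superscript, subscript, url) =>
    let text := if bold then "<b>" ++ text ++ "</b>" else text
    let text := if italic then "<i>" ++ text ++ "</i>" else text
    let text := if underline then "<u>" ++ text ++ "</u>" else text
    let text := if strikethrough then "<del>" ++ text ++ "</del>" else text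
    let text := if superscript then "<sup>" ++ text ++ "</sup>" else text
    let text := if subscript then "<sub>" ++ text ++ "</sub>" else text
    if url ≠ "" then "<a href=\"" ++ url ++ "\">" ++ text ++ "</a>" else text

-- the outer while loop: cut off the maximal prefix with the head's style key,
-- join its texts, wrap once, recurse on the rest
def pvGroupParts : List (Bool × Bool × Bool × Bool × Bool × Bool × String × String) → List String
  | [] => []
  | x :: xs =>
    let grp := xs.takeWhile (fun y => pvStyleKey y == pvStyleKey x)
    let rest := xs.dropWhile (fun y => pvStyleKey y == pvStyleKey x)
    pvWrapB (pvStyleKey x) (PySem.Str.join "" ((x :: grp).map (fun r => r.2.2.2.2.2.2.1))) ::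
      pvGroupParts rest
  termination_by l => l.length
  decreasing_by
    simp only [List.length_cons]
    exact Nat.lt_succ_of_le (List.length_dropWhile_le _ _)

def runs_to_html_py_alt (items : List (Bool × Bool × Bool × Bool × Bool × Bool × String × String)) : String :=
  PySem.Str.join "" (pvGroupParts (items.filter (fun r => r.2.2.2.2.2.2.1 != "")))

-- ===== PRECONDITION & SPEC =====
def Spec_runs_to_html_py (items : List (Bool × Bool × Bool × Bool × Bool × Bool × String × String)) (out : String) : Prop := out = runs_to_html_py_alt items
instance (items : List (Bool × Bool × Bool × Bool × Bool × Bool × String × String)) (out : String) : Decidable (Spec_runs_to_html_py items out) := by unfold Spec_runs_to_html_py; infer_instance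

-- ===== CLAIM (what is proved, stated in full; the proofs are below) =====
def Claim_equal_runs_to_html_py : Prop := ∀ (items : List (Bool × Bool × Bool × Bool × Bool × Bool × String × String)), Dom_runs_to_html_py items → Spec_runs_to_html_py items (runs_to_html_py items)

-- ===== LEMMAS AND PROOFS =====

-- proof-side mirror of pvGroupParts at the tuple level: the merged run each group produces
def pvGroupsSpec : List (Bool × Bool × Bool × Bool × Bool × Bool × String × String) →
    List (Bool × Bool × Bool × Bool × Bool × Bool × String × String)
  | [] => []
  | x :: xs =>
    let grp := xs.takeWhile (fun y => pvStyleKey y == pvStyleKey x)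
    let rest := xs.dropWhile (fun y => pvStyleKey y == pvStyleKey x)
    (x.1, x.2.1, x.2.2.1, x.2.2.2.1, x.2.2.2.2.1, x.2.2.2.2.2.1,
      PySem.Str.join "" ((x :: grp).map (fun r => r.2.2.2.2.2.2.1)), x.2.2.2.2.2.2.2) ::
      pvGroupsSpec rest
  termination_by l => l.length
  decreasing_by
    simp only [List.length_cons]
    exact Nat.lt_succ_of_le (List.length_dropWhile_le _ _)

theorem pv_join_cons (s : String) (rest : List String) :
    PySem.Str.join "" (s :: rest) = s ++ PySem.Str.join "" rest := by
  cases rest <;> simp [PySem.Str.join, PySem.Chars.join, List.intercalate]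

theorem pv_join_nil : PySem.Str.join "" ([] : List String) = "" := by
  simp [PySem.Str.join, PySem.Chars.join, List.intercalate]

-- empty-text runs are skipped: the fold over items equals the fold over the filtered list
theorem pv_foldl_filter (items : List (Bool × Bool × Bool × Bool × Bool × Bool × String × String))
    (acc : List (Bool × Bool × Bool × Bool × Bool × Bool × String × String)) :
    items.foldl pvMergeStep acc =
      (items.filter (fun r => r.2.2.2.2.2.2.1 != "")).foldl pvMergeStep acc := by
  induction items generalizing acc with
  | nil => rfl
  | cons x xs ih =>
    obtain ⟨b, i, u, st, sp, sb, t, url⟩ := x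
    by_cases ht : t = ""
    · subst ht
      simpa [List.filter, pvMergeStep] using ih acc
    · have ht' : ((b, i, u, st, sp, sb, t, url).2.2.2.2.2.2.1 != "") = true := by simpa using ht
      simp only [List.foldl_cons, List.filter_cons, ht', if_pos]
      exact ih _

-- key loop invariant: with an open group g at the end of merged, the fold over a
-- list of nonempty-text runs produces the groups of (g :: l)
theorem pv_fold_groups
    (l : List (Bool × Bool × Bool × Bool × Bool × Bool × String × String))
    (hl : ∀ y ∈ l, y.2.2.2.2.2.2.1 ≠ "")
    (pre g : _) :
    l.foldl pvMergeStep (pre ++ [g]) = pre ++ pvGroupsSpec (g :: l) := by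
  induction l generalizing pre g with
  | nil =>
    obtain ⟨b, i, u, st, sp, sb, t, url⟩ := g
    simp [pvGroupsSpec, pv_join_cons, pv_join_nil]
  | cons x xs ih =>
    have hx : x.2.2.2.2.2.2.1 ≠ "" := hl x (by simp)
    have hxs : ∀ y ∈ xs, y.2.2.2.2.2.2.1 ≠ "" := fun y hy => hl y (by simp [hy])
    obtain ⟨b, i, u, st, sp, sb, t, url⟩ := x
    obtain ⟨gb, gi, gu, gst, gsp, gsb, gt, gurl⟩ := g
    simp only [List.foldl_cons]
    by_cases hk : gb = b ∧ gi = i ∧ gu = u ∧ gst = st ∧ gsp = sp ∧ gsb = sb ∧ gurl = url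
    · obtain ⟨rfl, rfl, rfl, rfl, rfl, rfl, rfl⟩ := hk
      have hstep :
          pvMergeStep (pre ++ [(gb, gi, gu, gst, gsp, gsb, gt, gurl)]) (gb, gi, gu, gst, gsp, gsb, t, gurl) =
            pre ++ [(gb, gi, gu, gst, gsp, gsb, gt ++ t, gurl)] := by
        simp [pvMergeStep, hx]
      rw [hstep, ih hxs pre (gb, gi, gu, gst, gsp, gsb, gt ++ t, gurl)]
      -- both sides: same groups; head group's text re-associated
      simp only [pvGroupsSpec, pvStyleKey, List.takeWhile_cons, List.dropWhile_cons]
      simp [pv_join_cons, String.append_assoc]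
    · have hstep :
          pvMergeStep (pre ++ [(gb, gi, gu, gst, gsp, gsb, gt, gurl)]) (b, i, u, st, sp, sb, t, url) =
            (pre ++ [(gb, gi, gu, gst, gsp, gsb, gt, gurl)]) ++ [(b, i, u, st, sp, sb, t, url)] := by
        simp only [pvMergeStep, if_neg (by simpa using hx)]
        rw [List.getLast?_concat]
        exact if_neg hk
      rw [hstep, ih hxs (pre ++ [(gb, gi, gu, gst, gsp, gsb, gt, gurl)]) (b, i, u, st, sp, sb, t, url)]
      have hne : (pvStyleKey (b, i, u, st, sp, sb, t, url) ==
          pvStyleKey (gb, gi, gu, gst, gsp, gsb, gt, gurl)) = false := by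
        simp only [pvStyleKey, beq_eq_false_iff_ne, ne_eq, Prod.mk.injEq]
        tauto
      conv_rhs => rw [pvGroupsSpec]
      simp only [List.takeWhile_cons, List.dropWhile_cons, hne]
      simp [pv_join_cons, pv_join_nil, pvGroupsSpec]

-- the fold over a filtered list computes exactly the groups of that list
theorem pv_merge_eq_groups
    (l : List (Bool × Bool × Bool × Bool × Bool × Bool × String × String))
    (hl : ∀ y ∈ l, y.2.2.2.2.2.2.1 ≠ "") :
    l.foldl pvMergeStep [] = pvGroupsSpec l := by
  cases l with
  | nil => simp [pvGroupsSpec]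
  | cons x xs =>
    have hx : x.2.2.2.2.2.2.1 ≠ "" := hl x (by simp)
    have hxs : ∀ y ∈ xs, y.2.2.2.2.2.2.1 ≠ "" := fun y hy => hl y (by simp [hy])
    obtain ⟨b, i, u, st, sp, sb, t, url⟩ := x
    have hstep : pvMergeStep [] (b, i, u, st, sp, sb, t, url) =
        ([] ++ [(b, i, u, st, sp, sb, t, url)]) := by
      simp [pvMergeStep, hx]
    simp only [List.foldl_cons, hstep]
    simpa using pv_fold_groups xs hxs [] (b, i, u, st, sp, sb, t, url)

-- rendering a merged group tuple is wrapping the group's joined text in its style key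
theorem pv_map_render_groups
    (l : List (Bool × Bool × Bool × Bool × Bool × Bool × String × String)) :
    (pvGroupsSpec l).map pvRenderA = pvGroupParts l := by
  induction l using pvGroupParts.induct with
  | case1 => simp [pvGroupsSpec, pvGroupParts]
  | case2 x xs grp ih =>
    rw [pvGroupsSpec, pvGroupParts]
    simp only [List.map_cons]
    refine congrArg₂ List.cons ?_ ih
    obtain ⟨b, i, u, st, sp, sb, t, url⟩ := x
    simp [pvRenderA, pvWrapB, pvStyleKey]

theorem pv_main (items : List (Bool × Bool × Bool × Bool × Bool × Bool × String × String)) :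
    runs_to_html_py items = runs_to_html_py_alt items := by
  unfold runs_to_html_py runs_to_html_py_alt pvMergeRuns
  rw [pv_foldl_filter items []]
  rw [pv_merge_eq_groups _ (fun y hy => by simpa using (List.of_mem_filter hy))]
  rw [pv_map_render_groups]

-- ===== VERDICT (by name: the statement is the Claim_ definition above) =====
theorem runs_to_html_py_spec : Claim_equal_runs_to_html_py := by
  intro items _
  exact pv_main items
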